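-- pv_equiv track=rewrite | github.com/ckoons/BubbleSpacetimeTheory | play/toy_336_ldpc_communication_game.py | find_backbone
-- ===== SOURCE A (Python) =====
-- def find_backbone(solutions, n):
--     """Backbone = variables frozen across ALL solutions."""
--     if not solutions:
--         return set(), {}
--     backbone_vars = set()
--     backbone_vals = {}
--     for i in range(n):
--         vals = set(sol[i] for sol in solutions)
--         if len(vals) == 1:
--             backbone_vars.add(i)
--             backbone_vals[i] = list(vals)[0]
--     return backbone_vars, backbone_vals
-- ===== SOURCE B (Python) =====
-- def find_backbone(solutions, n):
--     """Backbone = variables frozen across ALL solutions."""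
--     if not solutions:
--         return set(), {}
--     first = solutions[0]
--     backbone_vals = {i: first[i] for i in range(n)}
--     for sol in solutions[1:]:
--         for i in list(backbone_vals):
--             if sol[i] != backbone_vals[i]:
--                 del backbone_vals[i]
--     return set(backbone_vals), backbone_vals
-- ===== Notes on version B (the rewrite author's own statement) =====
-- stated objective: faster
-- what changed: Solution-outer/column-inner pruning: B takes the first solution as reference, keeps a dict of still-candidate columns, and while scanning the remaining solutions deletes any candidate whose value disagrees, instead of A's column-outer pass that builds a set of all values per column.
import Mathlib
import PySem

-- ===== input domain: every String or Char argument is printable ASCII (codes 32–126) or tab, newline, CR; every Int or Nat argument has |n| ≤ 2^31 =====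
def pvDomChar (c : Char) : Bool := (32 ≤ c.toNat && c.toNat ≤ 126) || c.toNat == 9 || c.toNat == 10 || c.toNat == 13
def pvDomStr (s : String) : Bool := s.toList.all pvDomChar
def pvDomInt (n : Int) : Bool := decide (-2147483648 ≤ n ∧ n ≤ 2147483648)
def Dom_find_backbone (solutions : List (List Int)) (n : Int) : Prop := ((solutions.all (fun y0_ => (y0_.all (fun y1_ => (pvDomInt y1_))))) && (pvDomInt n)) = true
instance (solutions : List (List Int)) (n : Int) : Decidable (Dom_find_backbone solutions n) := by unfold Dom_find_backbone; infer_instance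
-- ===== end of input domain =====

-- B prunes columns solution-by-solution instead of A's per-column value-set pass: it avoids building a set per column and skips already-pruned columns (a constant-factor mechanism).

-- ===== PORT A =====
-- A, step for step: early return on empty input, then for i in range(n) build the set of
-- values of column i over all solutions; if it is a singleton, record i and its value.
-- sol[i] is ported as pyGetD sol i 0: Python raises IndexError exactly where pyGet? is none;
-- those inputs are excluded by Pre_ below.
def find_backbone (solutions : List (List Int)) (n : Int) : List Int × (List (Int × Int)) :=
  if solutions = [] then ([], [])
  else
    let st := (PySem.List.pyRange 0 n 1).foldl
      (fun (st : PySem.Set Int × PySem.Dict Int Int) i =>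
        let vals : PySem.Set Int :=
          PySem.Set.ofList (solutions.map (fun sol => PySem.List.pyGetD sol i 0))
        if vals.length = 1 then
          (PySem.Set.add st.1 i, st.2.insert i (vals.headD 0))  -- list(vals)[0] of a singleton set = its head
        else st)
      (PySem.Set.empty, PySem.Dict.empty)
    (st.1, st.2.items)

-- ===== PORT B =====
-- B, step for step: dict {i: first[i]} over range(n), then for each remaining solution
-- delete (from a snapshot of the keys) every candidate column that disagrees.
def find_backbone_alt (solutions : List (List Int)) (n : Int) : List Int × (List (Int × Int)) :=
  match solutions with
  | [] => ([], [])
  | first :: rest =>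
    let init : PySem.Dict Int Int :=
      (PySem.List.pyRange 0 n 1).foldl
        (fun d i => d.insert i (PySem.List.pyGetD first i 0)) PySem.Dict.empty
    let final := rest.foldl
      (fun d sol => d.keys.foldl
        (fun (d' : PySem.Dict Int Int) i => if PySem.List.pyGetD sol i 0 ≠ d'.getD i 0 then d'.erase i else d') d)
      init
    (PySem.Set.ofList final.keys, final.items)

-- ===== PRECONDITION & SPEC =====
-- Pre_ excludes exactly the inputs where Python A raises IndexError: a nonempty solution list
-- with some solution shorter than n (for 0 < n). It excludes no input on which A returns.
def Pre_find_backbone (solutions : List (List Int)) (n : Int) : Prop :=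
  ∀ sol ∈ solutions, 0 < n → n ≤ (sol.length : Int)
instance (solutions : List (List Int)) (n : Int) : Decidable (Pre_find_backbone solutions n) := by
  unfold Pre_find_backbone; infer_instance
def pvWitness_find_backbone : List (List Int) × Int := ([[1, 2], [1, 3]], 2)

def Spec_find_backbone (solutions : List (List Int)) (n : Int) (out : List Int × (List (Int × Int))) : Prop := out = find_backbone_alt solutions n
instance (solutions : List (List Int)) (n : Int) (out : List Int × (List (Int × Int))) : Decidable (Spec_find_backbone solutions n out) := by unfold Spec_find_backbone; infer_instance

-- ===== CLAIM (what is proved, stated in full; the proofs are below) =====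
def Claim_equal_find_backbone : Prop := ∀ (solutions : List (List Int)) (n : Int), Dom_find_backbone solutions n → Pre_find_backbone solutions n → Spec_find_backbone solutions n (find_backbone solutions n)

-- ===== LEMMAS AND PROOFS =====

-- abbreviation used only in the proofs
def pvCol (sol : List Int) (i : Int) : Int := PySem.List.pyGetD sol i 0

-- a set built from a :: l is the singleton [a] iff every element of l equals a
lemma pvSet_all_eq (a : Int) (l : List Int) (h : l.all (· == a)) :
    PySem.Set.ofList (a :: l) = [a] := by
  rw [PySem.Set.ofList_eq_foldl]
  have h0 : PySem.Set.add [] a = [a] := rfl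
  simp only [List.foldl_cons, h0]
  induction l with
  | nil => rfl
  | cons x t ih =>
    simp only [List.all_cons, Bool.and_eq_true, beq_iff_eq] at h
    have : PySem.Set.add [a] x = [a] := by
      simp [PySem.Set.add, PySem.Set.contains, h.1]
    simp only [List.foldl_cons, this, ih h.2]

lemma pvSet_len_one_iff (a : Int) (l : List Int) :
    (PySem.Set.ofList (a :: l)).length = 1 ↔ l.all (· == a) := by
  constructor
  · intro h1
    by_contra hall
    obtain ⟨x, hx, hxa⟩ := by simpa [List.all_eq_true] using hall
    obtain ⟨y, hy⟩ := List.length_eq_one_iff.mp h1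
    have ha : a ∈ PySem.Set.ofList (a :: l) := by
      rw [PySem.Set.mem_ofList]; exact List.mem_cons_self
    have hxm : x ∈ PySem.Set.ofList (a :: l) := by
      rw [PySem.Set.mem_ofList]; exact List.mem_cons_of_mem _ hx
    rw [hy] at ha hxm
    simp at ha hxm
    exact hxa (hxm.trans ha.symm)
  · intro h; rw [pvSet_all_eq a l h]; rfl

-- the inner loop of B: folding erase-if-disagree over a snapshot of the keys filters the dict
lemma pvEraseFold (sol : List Int) (f : Int → Int) (ks : List Int) (pre : List (Int × Int))
    (hnd : ks.Nodup) (hpre : ∀ j ∈ ks, ∀ p ∈ pre, p.1 ≠ j) :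
    ks.foldl (fun (d' : PySem.Dict Int Int) i => if PySem.List.pyGetD sol i 0 ≠ d'.getD i 0 then d'.erase i else d')
        ⟨pre ++ ks.map (fun i => (i, f i))⟩
      = ⟨pre ++ (ks.filter (fun i => pvCol sol i == f i)).map (fun i => (i, f i))⟩ := by
  induction ks generalizing pre with
  | nil => simp
  | cons k t ih =>
    have hknt : k ∉ t := (List.nodup_cons.mp hnd).1
    have hget : (PySem.Dict.getD (⟨pre ++ (k :: t).map (fun i => (i, f i))⟩ : PySem.Dict Int Int) k 0) = f k := by
      simp only [PySem.Dict.getD, PySem.Dict.get?, List.map_cons]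
      rw [List.find?_append]
      have : List.find? (fun p => p.1 == k) pre = none := by
        rw [List.find?_eq_none]
        intro p hp
        simp [hpre k List.mem_cons_self p hp]
      simp [this]
    simp only [List.foldl_cons, hget]
    by_cases hc : PySem.List.pyGetD sol k 0 = f k
    · -- k agrees: dict unchanged, k survives the filter
      rw [if_neg (by simpa using hc)]
      have hassoc : pre ++ (k :: t).map (fun i => (i, f i))
          = (pre ++ [(k, f k)]) ++ t.map (fun i => (i, f i)) := by simp
      rw [hassoc, ih (pre ++ [(k, f k)]) (List.nodup_cons.mp hnd).2 (by
        intro j hj p hp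
        rcases List.mem_append.mp hp with h | h
        · exact hpre j (List.mem_cons_of_mem _ hj) p h
        · simp at h; subst h; intro hkj; exact hknt ((show k = j from hkj) ▸ hj))]
      have : (k :: t).filter (fun i => pvCol sol i == f i)
          = k :: t.filter (fun i => pvCol sol i == f i) := by
        simp [pvCol, hc]
      rw [this]; simp
    · -- k disagrees: erase k, k is dropped by the filter
      rw [if_pos (by simpa using hc)]
      have herase : (PySem.Dict.erase (⟨pre ++ (k :: t).map (fun i => (i, f i))⟩ : PySem.Dict Int Int) k)
          = ⟨pre ++ t.map (fun i => (i, f i))⟩ := by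
        simp only [PySem.Dict.erase, List.map_cons]
        congr 1
        rw [List.filter_append]
        congr 1
        · exact List.filter_eq_self.mpr (fun p hp => by
            simp [hpre k List.mem_cons_self p hp])
        · simp only [List.filter_cons]
          have : (!(k, f k).1 == k) = false := by simp
          rw [this]
          exact List.filter_eq_self.mpr (fun p hp => by
            obtain ⟨i, hi, rfl⟩ := List.mem_map.mp hp
            simp; intro h; subst h; exact hknt hi)
      rw [herase, ih pre (List.nodup_cons.mp hnd).2 (fun j hj p hp => hpre j (List.mem_cons_of_mem _ hj) p hp)]
      have : (k :: t).filter (fun i => pvCol sol i == f i)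
          = t.filter (fun i => pvCol sol i == f i) := by
        simp [pvCol, hc]
      rw [this]

-- the outer loop of B over the remaining solutions
lemma pvOuterFold (rest : List (List Int)) (f : Int → Int) (ks : List Int) (hnd : ks.Nodup) :
    rest.foldl
      (fun (d : PySem.Dict Int Int) sol => d.keys.foldl
        (fun (d' : PySem.Dict Int Int) i => if PySem.List.pyGetD sol i 0 ≠ d'.getD i 0 then d'.erase i else d') d)
      ⟨ks.map (fun i => (i, f i))⟩
    = ⟨(ks.filter (fun i => rest.all (fun sol => pvCol sol i == f i))).map (fun i => (i, f i))⟩ := by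
  induction rest generalizing ks with
  | nil => simp
  | cons sol rest' ih =>
    have hkeys : (PySem.Dict.keys (⟨ks.map (fun i => (i, f i))⟩ : PySem.Dict Int Int)) = ks := by
      simp [PySem.Dict.keys, Function.comp_def]
    simp only [List.foldl_cons, hkeys]
    have := pvEraseFold sol f ks [] hnd (by simp)
    simp only [List.nil_append] at this
    rw [this, ih _ (List.Nodup.filter _ hnd)]
    rw [List.filter_filter]
    congr 1
    congr 1
    apply List.filter_congr
    intro i _
    simp [List.all_cons, Bool.and_comm]

-- A on nonempty input, in closed form
lemma pvA_closed (first : List Int) (rest : List (List Int)) (n : Int) :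
    find_backbone (first :: rest) n
      = ((PySem.List.pyRange 0 n 1).filter
            (fun i => rest.all (fun sol => pvCol sol i == pvCol first i)),
         ((PySem.List.pyRange 0 n 1).filter
            (fun i => rest.all (fun sol => pvCol sol i == pvCol first i))).map
            (fun i => (i, pvCol first i))) := by
  unfold find_backbone
  rw [if_neg (by simp)]
  have hstep : (fun (st : PySem.Set Int × PySem.Dict Int Int) (i : Int) =>
        let vals : PySem.Set Int :=
          PySem.Set.ofList ((first :: rest).map (fun sol => PySem.List.pyGetD sol i 0))
        if vals.length = 1 then
          (PySem.Set.add st.1 i, st.2.insert i (vals.headD 0))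
        else st)
      = (fun st i =>
        if (PySem.Set.ofList ((first :: rest).map (fun sol => PySem.List.pyGetD sol i 0))).length = 1 then
          (PySem.Set.add st.1 i,
           st.2.insert i ((PySem.Set.ofList ((first :: rest).map (fun sol => PySem.List.pyGetD sol i 0))).headD 0))
        else st) := rfl
  rw [hstep]
  rw [PySem.List.foldl_ite_eq_foldl_filter
        (p := fun i => (PySem.Set.ofList ((first :: rest).map (fun sol => PySem.List.pyGetD sol i 0))).length = 1)
        (f := fun (st : PySem.Set Int × PySem.Dict Int Int) i =>
          (PySem.Set.add st.1 i,
           st.2.insert i ((PySem.Set.ofList ((first :: rest).map (fun sol => PySem.List.pyGetD sol i 0))).headD 0)))]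
  have hpred : (PySem.List.pyRange 0 n 1).filter
        (fun i => decide ((PySem.Set.ofList ((first :: rest).map (fun sol => PySem.List.pyGetD sol i 0))).length = 1))
      = (PySem.List.pyRange 0 n 1).filter
        (fun i => rest.all (fun sol => pvCol sol i == pvCol first i)) := by
    apply List.filter_congr
    intro i _
    simp only [List.map_cons]
    have h1 := pvSet_len_one_iff (PySem.List.pyGetD first i 0) (rest.map (fun sol => PySem.List.pyGetD sol i 0))
    rw [Bool.eq_iff_iff, decide_eq_true_iff, h1]
    simp [List.all_map, pvCol, Function.comp_def]
  rw [hpred]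
  have hnodup : ((PySem.List.pyRange 0 n 1).filter
      (fun i => rest.all (fun sol => pvCol sol i == pvCol first i))).Nodup :=
    List.Nodup.filter _ (PySem.List.nodup_pyRange_one 0 n)
  have hst : List.foldl (fun (st : PySem.Set Int × PySem.Dict Int Int) i =>
        (PySem.Set.add st.1 i,
         st.2.insert i ((PySem.Set.ofList ((first :: rest).map (fun sol => PySem.List.pyGetD sol i 0))).headD 0)))
      (PySem.Set.empty, PySem.Dict.empty)
      ((PySem.List.pyRange 0 n 1).filter (fun i => rest.all (fun sol => pvCol sol i == pvCol first i)))
      = (((PySem.List.pyRange 0 n 1).filter (fun i => rest.all (fun sol => pvCol sol i == pvCol first i))),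
         ⟨((PySem.List.pyRange 0 n 1).filter (fun i => rest.all (fun sol => pvCol sol i == pvCol first i))).map
            (fun i => (i, pvCol first i))⟩) := by
    rw [PySem.List.foldl_prod_mk
          (f := fun (s : PySem.Set Int) (i : Int) => PySem.Set.add s i)
          (g := fun (d : PySem.Dict Int Int) (i : Int) =>
            d.insert i ((PySem.Set.ofList ((first :: rest).map (fun sol => PySem.List.pyGetD sol i 0))).headD 0))]
    simp only [Prod.mk.injEq]
    refine ⟨?_, ?_⟩
    · show PySem.Set.ofList _ = _
      exact PySem.Set.ofList_eq_self_of_nodup _ hnodup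
    · apply PySem.Dict.ext
      rw [PySem.Dict.items_foldl_insert_fresh _ (fun i => i) _ PySem.Dict.empty
            (fun a _ => PySem.Dict.contains_empty a) (by simpa using hnodup)]
      simp only [PySem.Dict.empty, List.nil_append]
      apply List.map_congr_left
      intro i hi
      have hall : (rest.map (fun sol => PySem.List.pyGetD sol i 0)).all (· == PySem.List.pyGetD first i 0) := by
        have := (List.mem_filter.mp hi).2
        simp only [List.all_map, pvCol, Function.comp_def] at this ⊢
        simpa using this
      rw [show ((first :: rest).map (fun sol => PySem.List.pyGetD sol i 0))
            = PySem.List.pyGetD first i 0 :: rest.map (fun sol => PySem.List.pyGetD sol i 0) from rfl]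
      rw [pvSet_all_eq _ _ hall]
      rfl
  rw [hst]

-- the verdict, as one equation between the two ports (holds for every input)
lemma pvMain (solutions : List (List Int)) (n : Int) :
    find_backbone solutions n = find_backbone_alt solutions n := by
  match solutions with
  | [] => rfl
  | first :: rest =>
    rw [pvA_closed]
    simp only [find_backbone_alt]
    have hL : (PySem.List.pyRange 0 n 1).Nodup := PySem.List.nodup_pyRange_one 0 n
    have hinit : (PySem.List.pyRange 0 n 1).foldl
        (fun d i => d.insert i (PySem.List.pyGetD first i 0)) PySem.Dict.empty
        = (⟨(PySem.List.pyRange 0 n 1).map (fun i => (i, pvCol first i))⟩ : PySem.Dict Int Int) := by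
      apply PySem.Dict.ext
      rw [PySem.Dict.items_foldl_insert_fresh _ (fun i => i) _ PySem.Dict.empty
            (fun a _ => PySem.Dict.contains_empty a) (by simpa using hL)]
      simp [PySem.Dict.empty, pvCol]
    rw [hinit, pvOuterFold rest (fun i => pvCol first i) _ hL]
    have hnodup : ((PySem.List.pyRange 0 n 1).filter
        (fun i => rest.all (fun sol => pvCol sol i == pvCol first i))).Nodup :=
      List.Nodup.filter _ hL
    have hkeys : (PySem.Dict.keys (⟨((PySem.List.pyRange 0 n 1).filter
          (fun i => rest.all (fun sol => pvCol sol i == pvCol first i))).map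
          (fun i => (i, pvCol first i))⟩ : PySem.Dict Int Int))
        = (PySem.List.pyRange 0 n 1).filter
          (fun i => rest.all (fun sol => pvCol sol i == pvCol first i)) := by
      simp [PySem.Dict.keys, Function.comp_def]
    rw [hkeys]
    rw [PySem.Set.ofList_eq_self_of_nodup _ hnodup]

-- ===== VERDICT (by name: the statement is the Claim_ definition above) =====
theorem find_backbone_spec : Claim_equal_find_backbone := by
  intro solutions n _ _
  unfold Spec_find_backbone
  exact pvMain solutions n
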